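-- pv_equiv track=rewrite | github.com/philiprehberger/py-sql-print | src/philiprehberger_sql_print/__init__.py | _match_multi_keyword
-- ===== SOURCE A (Python) =====
-- def _match_multi_keyword(tokens: list[str], start: int) -> str | None:
--     """Check if tokens starting at `start` form a multi-word keyword."""
--     multi_keywords = [
--         "FULL OUTER JOIN", "LEFT JOIN", "RIGHT JOIN", "INNER JOIN",
--         "OUTER JOIN", "CROSS JOIN", "ORDER BY", "GROUP BY",
--         "INSERT INTO", "DELETE FROM", "UNION ALL",
--         "CREATE TABLE", "ALTER TABLE", "DROP TABLE",
--     ]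
--     for kw in multi_keywords:
--         parts = kw.split()
--         if start + len(parts) <= len(tokens):
--             candidate = " ".join(tokens[start:start + len(parts)])
--             if candidate.upper() == kw:
--                 return candidate
--     return None
-- ===== SOURCE B (Python) =====
-- _TWO_WORD_KEYWORDS = {
--     "left join", "right join", "inner join", "outer join", "cross join",
--     "order by", "group by", "insert into", "delete from", "union all",
--     "create table", "alter table", "drop table",
-- }
--
--
-- def _try_three(tokens, start):
--     """The single 3-word keyword, matched directly (case-insensitively)."""
--     if start + 3 <= len(tokens):
--         c = " ".join(tokens[start:start + 3])
--         if c.lower() == "full outer join":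
--             return c
--     return None
--
--
-- def _try_two(tokens, start):
--     """Any 2-word keyword, by one set lookup (case-insensitively)."""
--     if start + 2 <= len(tokens):
--         c = " ".join(tokens[start:start + 2])
--         if c.lower() in _TWO_WORD_KEYWORDS:
--             return c
--     return None
--
--
-- def _match_multi_keyword(tokens: list[str], start: int) -> str | None:
--     """Check if tokens starting at `start` form a multi-word keyword."""
--     hit = _try_three(tokens, start)
--     if hit is None:
--         hit = _try_two(tokens, start)
--     return hit
-- ===== Notes on version B (the rewrite author's own statement) =====
-- stated objective: simpler
-- what changed: Removes A's loop over the 14 keywords (splitting every keyword and re-joining the same token slice per keyword): B is loop-free, first matching the one 3-word keyword with a direct lowercase comparison, then the 2-word keywords with a single lookup in a precomputed lowercase set, building each candidate once.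
import Mathlib
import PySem

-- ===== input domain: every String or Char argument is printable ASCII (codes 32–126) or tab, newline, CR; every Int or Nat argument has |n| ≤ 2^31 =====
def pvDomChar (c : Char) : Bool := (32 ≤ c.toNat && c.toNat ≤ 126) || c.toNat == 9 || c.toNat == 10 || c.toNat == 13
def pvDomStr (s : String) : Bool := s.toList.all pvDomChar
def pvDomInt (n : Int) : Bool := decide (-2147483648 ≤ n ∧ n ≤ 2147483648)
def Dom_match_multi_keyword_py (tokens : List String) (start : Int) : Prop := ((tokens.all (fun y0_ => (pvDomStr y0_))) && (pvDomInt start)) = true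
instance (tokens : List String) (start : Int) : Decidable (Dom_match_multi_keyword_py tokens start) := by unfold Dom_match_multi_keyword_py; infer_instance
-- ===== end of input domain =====

-- B is loop-free: instead of A's scan over 14 keywords it matches the single 3-word keyword
-- directly and then the 2-word keywords by one lowercase-set lookup — objective 'simpler'.

-- ===== PORT A =====
def aMultiKeywords : List String :=
  ["FULL OUTER JOIN", "LEFT JOIN", "RIGHT JOIN", "INNER JOIN",
   "OUTER JOIN", "CROSS JOIN", "ORDER BY", "GROUP BY",
   "INSERT INTO", "DELETE FROM", "UNION ALL",
   "CREATE TABLE", "ALTER TABLE", "DROP TABLE"]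

-- the 'for kw in multi_keywords' loop of A
def aLoop (tokens : List String) (start : Int) : List String → Option String
  | [] => none
  | kw :: rest =>
    let parts := PySem.Str.split₀ kw
    if start + (parts.length : Int) ≤ (tokens.length : Int) then
      let candidate := PySem.Str.join " "
        (PySem.List.slice tokens (some start) (some (start + (parts.length : Int))))
      if PySem.Str.upper candidate = kw then some candidate
      else aLoop tokens start rest
    else aLoop tokens start rest

def match_multi_keyword_py (tokens : List String) (start : Int) : Option String :=
  aLoop tokens start aMultiKeywords

-- ===== PORT B =====
def bTwoWordKeywords : PySem.Set String := PySem.Set.ofList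
  ["left join", "right join", "inner join", "outer join", "cross join",
   "order by", "group by", "insert into", "delete from", "union all",
   "create table", "alter table", "drop table"]

-- _try_three: the single 3-word keyword, matched directly (case-insensitively)
def bTryThree (tokens : List String) (start : Int) : Option String :=
  if start + 3 ≤ (tokens.length : Int) then
    let c := PySem.Str.join " " (PySem.List.slice tokens (some start) (some (start + 3)))
    if PySem.Str.lower c = "full outer join" then some c else none
  else none

-- _try_two: any 2-word keyword, by one set lookup (case-insensitively)
def bTryTwo (tokens : List String) (start : Int) : Option String :=
  if start + 2 ≤ (tokens.length : Int) then
    let c := PySem.Str.join " " (PySem.List.slice tokens (some start) (some (start + 2)))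
    if PySem.Str.lower c ∈ bTwoWordKeywords then some c else none
  else none

def match_multi_keyword_py_alt (tokens : List String) (start : Int) : Option String :=
  match bTryThree tokens start with
  | some hit => some hit
  | none => bTryTwo tokens start

-- ===== PRECONDITION & SPEC =====
def Spec_match_multi_keyword_py (tokens : List String) (start : Int) (out : Option String) : Prop := out = match_multi_keyword_py_alt tokens start
instance (tokens : List String) (start : Int) (out : Option String) : Decidable (Spec_match_multi_keyword_py tokens start out) := by unfold Spec_match_multi_keyword_py; infer_instance

-- ===== CLAIM (what is proved, stated in full; the proofs are below) =====
def Claim_equal_match_multi_keyword_py : Prop := ∀ (tokens : List String) (start : Int), Dom_match_multi_keyword_py tokens start → Spec_match_multi_keyword_py tokens start (match_multi_keyword_py tokens start)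

-- ===== LEMMAS AND PROOFS =====

-- Char arithmetic glue
theorem char_le_toNat {a b : Char} : a ≤ b ↔ a.toNat ≤ b.toNat := by
  rw [Char.le_def, UInt32.le_iff_toNat_le]; rfl

theorem char_toNat_ofNat {n : Nat} (h : n < 55296) : (Char.ofNat n).toNat = n := by
  rw [Char.toNat_ofNat, if_pos (Or.inl h)]

theorem char_ofNat_toNat (c : Char) : Char.ofNat c.toNat = c := by
  have h : c.toNat < 55296 ∨ (57343 < c.toNat ∧ c.toNat < 1114112) := by
    rcases c.valid with h | h
    · left; exact_mod_cast h
    · right; exact ⟨by exact_mod_cast h.1, by exact_mod_cast h.2⟩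
  apply Char.ext
  rw [Char.val_ofNat (by exact h), Char.ofNat_toNat_eq_val]

theorem islower_iff (c : Char) : PySem.Chars.islower c = true ↔ (97 ≤ c.toNat ∧ c.toNat ≤ 122) := by
  unfold PySem.Chars.islower
  rw [Bool.and_eq_true, decide_eq_true_iff, decide_eq_true_iff, char_le_toNat, char_le_toNat]
  simp only [show 'a'.toNat = 97 from by decide, show 'z'.toNat = 122 from by decide]

theorem isupper_iff (c : Char) : PySem.Chars.isupper c = true ↔ (65 ≤ c.toNat ∧ c.toNat ≤ 90) := by
  unfold PySem.Chars.isupper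
  rw [Bool.and_eq_true, decide_eq_true_iff, decide_eq_true_iff, char_le_toNat, char_le_toNat]
  simp only [show 'A'.toNat = 65 from by decide, show 'Z'.toNat = 90 from by decide]

-- lowercasing after uppercasing is plain lowercasing, and vice versa (per char, then per string)
theorem lower_upper_char (c : Char) :
    PySem.Chars.lowerChar (PySem.Chars.upperChar c) = PySem.Chars.lowerChar c := by
  unfold PySem.Chars.upperChar
  by_cases hl : PySem.Chars.islower c = true
  · rw [if_pos hl]
    have hc : 97 ≤ c.toNat ∧ c.toNat ≤ 122 := (islower_iff c).1 hl
    have ht : (Char.ofNat (c.toNat - 32)).toNat = c.toNat - 32 := char_toNat_ofNat (by omega)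
    unfold PySem.Chars.lowerChar
    rw [if_pos ((isupper_iff _).2 (by rw [ht]; omega)),
        if_neg (fun hu => by have := (isupper_iff c).1 hu; omega), ht,
        show c.toNat - 32 + 32 = c.toNat by omega, char_ofNat_toNat]
  · rw [if_neg hl]

theorem upper_lower_char (c : Char) :
    PySem.Chars.upperChar (PySem.Chars.lowerChar c) = PySem.Chars.upperChar c := by
  unfold PySem.Chars.lowerChar
  by_cases hu : PySem.Chars.isupper c = true
  · rw [if_pos hu]
    have hc : 65 ≤ c.toNat ∧ c.toNat ≤ 90 := (isupper_iff c).1 hu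
    have ht : (Char.ofNat (c.toNat + 32)).toNat = c.toNat + 32 := char_toNat_ofNat (by omega)
    unfold PySem.Chars.upperChar
    rw [if_pos ((islower_iff _).2 (by rw [ht]; omega)),
        if_neg (fun hl => by have := (islower_iff c).1 hl; omega), ht,
        show c.toNat + 32 - 32 = c.toNat by omega, char_ofNat_toNat]
  · rw [if_neg hu]

theorem str_lower_upper (s : String) :
    PySem.Str.lower (PySem.Str.upper s) = PySem.Str.lower s := by
  apply String.toList_injective
  simp [PySem.Str.toList_lower, PySem.Str.toList_upper, PySem.Chars.lower, PySem.Chars.upper,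
        List.map_map]
  exact fun c _ => lower_upper_char c

theorem str_upper_lower (s : String) :
    PySem.Str.upper (PySem.Str.lower s) = PySem.Str.upper s := by
  apply String.toList_injective
  simp [PySem.Str.toList_lower, PySem.Str.toList_upper, PySem.Chars.lower, PySem.Chars.upper,
        List.map_map]
  exact fun c _ => upper_lower_char c

-- uppercase comparison against an uppercase keyword = lowercase comparison against its lowercase form
theorem upper_eq_iff_lower_eq (s KW kw : String)
    (h1 : PySem.Str.lower KW = kw) (h2 : PySem.Str.upper kw = KW) :
    PySem.Str.upper s = KW ↔ PySem.Str.lower s = kw := by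
  constructor
  · intro h; rw [← h1, ← h, str_lower_upper]
  · intro h; rw [← h2, ← h, str_upper_lower]

-- the same, lifted to membership in the keyword lists (paired uppercase/lowercase)
theorem mem_upper_iff_mem_lower (s : String) (KWs kws : List String)
    (h : List.Forall₂ (fun KW kw => PySem.Str.lower KW = kw ∧ PySem.Str.upper kw = KW) KWs kws) :
    (PySem.Str.upper s ∈ KWs) ↔ (PySem.Str.lower s ∈ kws) := by
  induction h with
  | nil => simp
  | cons hp _ ih =>
    simp only [List.mem_cons]
    exact or_congr (upper_eq_iff_lower_eq s _ _ hp.1 hp.2) ih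

-- A's loop over a list of 2-word keywords returns the (fixed) 2-token candidate iff its
-- uppercase form occurs in the list.
theorem aLoop_two_words (tokens : List String) (start : Int) (kws : List String)
    (h : ∀ kw ∈ kws, (PySem.Str.split₀ kw).length = 2) :
    aLoop tokens start kws =
      if start + 2 ≤ (tokens.length : Int) ∧
         PySem.Str.upper (PySem.Str.join " "
           (PySem.List.slice tokens (some start) (some (start + 2)))) ∈ kws
      then some (PySem.Str.join " " (PySem.List.slice tokens (some start) (some (start + 2))))
      else none := by
  induction kws with
  | nil => simp [aLoop]
  | cons kw rest ih =>
    have hkw : ((PySem.Str.split₀ kw).length : Int) = 2 := by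
      have := h kw (by simp); omega
    have hrest : ∀ k ∈ rest, (PySem.Str.split₀ k).length = 2 := fun k hk => h k (by simp [hk])
    simp only [aLoop, hkw, ih hrest, List.mem_cons]
    by_cases hg : start + 2 ≤ (tokens.length : Int)
    · by_cases he : PySem.Str.upper (PySem.Str.join " "
        (PySem.List.slice tokens (some start) (some (start + 2)))) = kw
      · simp [hg, he]
      · simp [hg, he]
    · simp [hg]

-- ===== VERDICT (by name: the statement is the Claim_ definition above) =====
theorem match_multi_keyword_py_spec : Claim_equal_match_multi_keyword_py := by
  intro tokens start _
  unfold Spec_match_multi_keyword_py match_multi_keyword_py match_multi_keyword_py_alt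
  unfold aMultiKeywords bTryThree bTryTwo
  rw [aLoop]
  have h3 : ((PySem.Str.split₀ "FULL OUTER JOIN").length : Int) = 3 := by decide
  have h2 : ∀ kw ∈ ["LEFT JOIN", "RIGHT JOIN", "INNER JOIN",
      "OUTER JOIN", "CROSS JOIN", "ORDER BY", "GROUP BY",
      "INSERT INTO", "DELETE FROM", "UNION ALL",
      "CREATE TABLE", "ALTER TABLE", "DROP TABLE"],
      (PySem.Str.split₀ kw).length = 2 := by decide
  rw [aLoop_two_words tokens start _ h2]
  have hb2 : bTwoWordKeywords = ["left join", "right join", "inner join",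
      "outer join", "cross join", "order by", "group by",
      "insert into", "delete from", "union all",
      "create table", "alter table", "drop table"] := by decide
  have e3 := upper_eq_iff_lower_eq
    (PySem.Str.join " " (PySem.List.slice tokens (some start) (some (start + 3))))
    "FULL OUTER JOIN" "full outer join" (by decide) (by decide)
  have e2 := mem_upper_iff_mem_lower
    (PySem.Str.join " " (PySem.List.slice tokens (some start) (some (start + 2))))
    ["LEFT JOIN", "RIGHT JOIN", "INNER JOIN",
     "OUTER JOIN", "CROSS JOIN", "ORDER BY", "GROUP BY",
     "INSERT INTO", "DELETE FROM", "UNION ALL",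
     "CREATE TABLE", "ALTER TABLE", "DROP TABLE"]
    ["left join", "right join", "inner join",
     "outer join", "cross join", "order by", "group by",
     "insert into", "delete from", "union all",
     "create table", "alter table", "drop table"] (by decide)
  simp only [h3, hb2]
  by_cases hg3 : start + 3 ≤ (tokens.length : Int)
  · by_cases he3 : PySem.Str.lower (PySem.Str.join " "
        (PySem.List.slice tokens (some start) (some (start + 3)))) = "full outer join"
    · simp [hg3, e3.2 he3, he3]
    · have ha3 : ¬ PySem.Str.upper (PySem.Str.join " "
          (PySem.List.slice tokens (some start) (some (start + 3)))) = "FULL OUTER JOIN" :=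
        fun h => he3 (e3.1 h)
      by_cases hg2 : start + 2 ≤ (tokens.length : Int)
      · simp only [hg3, if_true, ha3, if_false, he3, hg2, true_and, e2]
      · omega
  · by_cases hg2 : start + 2 ≤ (tokens.length : Int)
    · simp only [hg3, if_false, hg2, true_and, e2, if_true]
    · simp [hg3, hg2]
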